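-- pv_equiv track=rewrite | github.com/d1ssmuss/Egor-labs_AISD | main6.py | distribute_items_with_constraints
-- ===== SOURCE A (Python) =====
-- def distribute_items_with_constraints(T, K, max_items):
--     if K == 0:
--         return [[]] if T == 0 else []
--
--     result = []
--     for i in range(min(T, max_items) + 1):
--         for distribution in distribute_items_with_constraints(T - i, K - 1, max_items):
--             result.append([i] + distribution)
--     return result
-- ===== SOURCE B (Python) =====
-- def distribute_items_with_constraints(T, K, max_items):
--     if T < 0 or K < 0 or max_items < 0:
--         return [[]] if (T == 0 and K == 0) else []
--     if T > K * max_items: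
--         return []
--     row = [[[]]] + [[] for _ in range(T)]
--     for _ in range(K):
--         row = [[[i] + d for i in range(min(s, max_items) + 1) for d in row[s - i]]
--                for s in range(T + 1)]
--     return row[T]
-- ===== Notes on version B (the rewrite author's own statement) =====
-- stated objective: alternative
-- what changed: Top-down recursion over (T,K) is replaced by bottom-up dynamic programming: a table row dp[s] of all distributions of the current number of boxes summing to s is rebuilt K times and dp[T] of the last row is returned, reusing materialized subproblem lists instead of recomputing them.
import Mathlib
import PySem

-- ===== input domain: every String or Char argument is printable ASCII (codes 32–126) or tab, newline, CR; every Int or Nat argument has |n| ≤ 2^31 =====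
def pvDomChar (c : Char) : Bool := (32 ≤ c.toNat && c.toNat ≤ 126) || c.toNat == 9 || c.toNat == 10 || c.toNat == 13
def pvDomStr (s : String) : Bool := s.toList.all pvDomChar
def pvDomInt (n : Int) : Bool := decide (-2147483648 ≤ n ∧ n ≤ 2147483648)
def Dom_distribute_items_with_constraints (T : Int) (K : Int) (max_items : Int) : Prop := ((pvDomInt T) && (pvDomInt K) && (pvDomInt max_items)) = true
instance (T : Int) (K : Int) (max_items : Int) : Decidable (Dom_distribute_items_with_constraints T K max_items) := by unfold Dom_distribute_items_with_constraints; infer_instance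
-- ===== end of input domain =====

-- B replaces A's top-down recursion by bottom-up DP over a table row (alternative decomposition, same values).
-- ===== PORT A =====
-- The fuel argument only makes A's recursion total; on Pre_ (K ≥ 0 or an empty range)
-- fuel K.toNat + 1 is never exhausted, so this is A's recursion step for step.
def pvAAux : Nat → Int → Int → Int → List (List Int)
  | 0, _, _, _ => []
  | fuel+1, T, K, m =>
    if K = 0 then (if T = 0 then [[]] else [])
    else
      (PySem.List.pyRange 0 (min T m + 1) 1).foldl
        (fun result i =>
          (pvAAux fuel (T - i) (K - 1) m).foldl
            (fun result distribution => result ++ [i :: distribution]) result) []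

def distribute_items_with_constraints (T : Int) (K : Int) (max_items : Int) : List (List Int) :=
  pvAAux (K.toNat + 1) T K max_items

-- ===== PORT B =====
-- one DP step: from the row of all k-box distributions of each sum s, build the row for k+1 boxes
def pvRowStep (m : Int) (Tn : Nat) (row : List (List (List Int))) : List (List (List Int)) :=
  (List.range (Tn + 1)).map (fun (s : Nat) =>
    (List.range ((min (s : Int) m).toNat + 1)).flatMap
      (fun (i : Nat) => (row.getD (s - i) []).map (fun d => ((i : Int) :: d))))

def distribute_items_with_constraints_alt (T : Int) (K : Int) (max_items : Int) : List (List Int) :=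
  if T < 0 ∨ K < 0 ∨ max_items < 0 then
    (if T = 0 ∧ K = 0 then [[]] else [])
  else if K * max_items < T then []
  else
    ((List.range K.toNat).foldl (fun row _ => pvRowStep max_items T.toNat row)
      ([[]] :: List.replicate T.toNat [])).getD T.toNat []

-- ===== PRECONDITION & SPEC =====
-- Pre_ excludes exactly the inputs on which A recurses forever (RecursionError): K < 0 with T ≥ 0 and max_items ≥ 0.
def Pre_distribute_items_with_constraints (T : Int) (K : Int) (max_items : Int) : Prop :=
  ¬ (K < 0 ∧ 0 ≤ T ∧ 0 ≤ max_items)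
instance (T : Int) (K : Int) (max_items : Int) : Decidable (Pre_distribute_items_with_constraints T K max_items) := by unfold Pre_distribute_items_with_constraints; infer_instance

def pvWitness_distribute_items_with_constraints : Int × Int × Int := (3, 2, 2)

def Spec_distribute_items_with_constraints (T : Int) (K : Int) (max_items : Int) (out : List (List Int)) : Prop := out = distribute_items_with_constraints_alt T K max_items
instance (T : Int) (K : Int) (max_items : Int) (out : List (List Int)) : Decidable (Spec_distribute_items_with_constraints T K max_items out) := by unfold Spec_distribute_items_with_constraints; infer_instance

-- ===== CLAIM (what is proved, stated in full; the proofs are below) =====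
def Claim_equal_distribute_items_with_constraints : Prop := ∀ (T : Int) (K : Int) (max_items : Int), Dom_distribute_items_with_constraints T K max_items → Pre_distribute_items_with_constraints T K max_items → Spec_distribute_items_with_constraints T K max_items (distribute_items_with_constraints T K max_items)

-- ===== LEMMAS AND PROOFS =====

-- A's two appending loops, flattened to flatMap/map form
theorem pvAAux_flat (fuel : Nat) (T K m : Int) :
    pvAAux (fuel+1) T K m =
      if K = 0 then (if T = 0 then [[]] else [])
      else (PySem.List.pyRange 0 (min T m + 1) 1).flatMap
        (fun i => (pvAAux fuel (T - i) (K - 1) m).map (fun d => i :: d)) := by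
  have h : ∀ (i : Int) (l : List (List Int)),
      (List.map (fun d => [i :: d]) l).flatten = List.map (fun d => i :: d) l := by
    intro i l
    induction l with
    | nil => rfl
    | cons x xs ih => simp [ih]
  simp [pvAAux, List.flatMap, h]

theorem pvAAux_neg (f : Nat) (T K m : Int) (h : min T m < 0) (hK : ¬ K = 0) :
    pvAAux (f+1) T K m = [] := by
  rw [pvAAux_flat, if_neg hK, PySem.List.pyRange_one_eq_nil (by omega)]
  rfl

-- no distribution exists when T exceeds K * max_items (all arguments nonnegative)
theorem pvAAux_gt : ∀ (n : Nat) (T K m : Int), 0 ≤ m → 0 ≤ K → K.toNat = n → K * m < T →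
    pvAAux (n+1) T K m = [] := by
  intro n
  induction n with
  | zero =>
    intro T K m hm hK hKn hgt
    have hK0 : K = 0 := by omega
    subst hK0
    have hT : ¬ T = 0 := by omega
    simp [pvAAux, hT]
  | succ n ih =>
    intro T K m hm hK hKn hgt
    have hKne : ¬ K = 0 := by omega
    rw [pvAAux_flat, if_neg hKne]
    rw [List.flatMap_eq_nil_iff]
    intro i hi
    rw [PySem.List.mem_pyRange_one] at hi
    have him : i ≤ m := le_trans (by omega) (min_le_right T m)
    rw [ih (T - i) (K - 1) m hm (by omega) (by omega) (by nlinarith)]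
    rfl

-- the DP row after k steps lists A's values for sums 0..Tn
theorem pvRow_eq (m : Int) (hm : 0 ≤ m) (Tn : Nat) : ∀ (k : Nat),
    (List.range k).foldl (fun row _ => pvRowStep m Tn row) ([[]] :: List.replicate Tn []) =
      (List.range (Tn + 1)).map (fun (s : Nat) => pvAAux (k+1) (s : Int) (k : Int) m) := by
  intro k
  induction k with
  | zero =>
    simp only [List.range_zero, List.foldl_nil]
    rw [List.range_succ_eq_map, List.map_cons, List.map_map]
    have h0 : pvAAux 1 (((0:Nat) : Int)) (((0:Nat) : Int)) m = [[]] := by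
      simp [pvAAux]
    rw [h0]
    have hc : ((fun (s : Nat) => pvAAux 1 (s : Int) (((0:Nat)) : Int) m) ∘ Nat.succ)
        = fun (_ : Nat) => ([] : List (List Int)) := by
      funext s
      simp [pvAAux]
    rw [hc, List.map_const', List.length_range]
  | succ k ih =>
    rw [List.range_succ, List.foldl_append, List.foldl_cons, List.foldl_nil, ih]
    unfold pvRowStep
    apply List.map_congr_left
    intro s hs
    rw [List.mem_range] at hs
    have hkne : ¬ (((k+1 : Nat) : Int) = 0) := by push_cast; omega
    rw [pvAAux_flat, if_neg hkne]
    have hmin0 : 0 ≤ min ((s:Nat) : Int) m := by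
      have h1 : (0 : Int) ≤ ((s:Nat) : Int) := Int.natCast_nonneg s
      omega
    rw [PySem.List.pyRange_one 0 (min ((s:Nat):Int) m + 1), List.flatMap_map]
    have hrng : (min ((s:Nat):Int) m + 1 - 0).toNat = (min ((s:Nat):Int) m).toNat + 1 := by omega
    rw [hrng]
    apply List.flatMap_congr
    intro i hi
    rw [List.mem_range] at hi
    have his : i ≤ s := by
      have h2 : (i : Int) ≤ min ((s:Nat):Int) m := by omega
      have h3 : (i : Int) ≤ ((s:Nat):Int) := le_trans h2 (min_le_left _ _)
      exact_mod_cast h3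
    have hlt : s - i < Tn + 1 := by omega
    rw [PySem.List.getD_map_range _ _ _ _ hlt]
    have hcast : (((s - i : Nat)) : Int) = ((s:Nat):Int) - ((i:Nat):Int) := by
      push_cast [his]; ring
    have harg : ((s:Nat):Int) - (0 + ((i:Nat):Int)) = (((s - i : Nat)) : Int) := by
      rw [hcast]; ring
    have hK1 : ((k+1 : Nat) : Int) - 1 = ((k : Nat) : Int) := by push_cast; ring
    rw [harg, hK1]
    have hzero : (0 : Int) + ((i:Nat):Int) = ((i:Nat):Int) := by ring
    rw [hzero]

-- ===== VERDICT (by name: the statement is the Claim_ definition above) =====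
theorem distribute_items_with_constraints_spec : Claim_equal_distribute_items_with_constraints := by
  intro T K m _ hpre
  unfold Spec_distribute_items_with_constraints
  unfold distribute_items_with_constraints distribute_items_with_constraints_alt
  unfold Pre_distribute_items_with_constraints at hpre
  by_cases hg : T < 0 ∨ K < 0 ∨ m < 0
  · rw [if_pos hg]
    by_cases hK0 : K = 0
    · subst hK0
      by_cases hT0 : T = 0
      · subst hT0; simp [pvAAux]
      · simp [pvAAux, hT0]
    · have hTm1 := min_le_left T m
      have hTm2 := min_le_right T m
      have hmin : min T m < 0 := by
        rcases hg with h | h | h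
        · omega
        · by_cases hT : 0 ≤ T
          · by_cases hm' : 0 ≤ m
            · exact absurd ⟨h, hT, hm'⟩ hpre
            · omega
          · omega
        · omega
      have hfuel : ∃ f, K.toNat + 1 = f + 1 := ⟨K.toNat, rfl⟩
      obtain ⟨f, hf⟩ := hfuel
      rw [hf, pvAAux_neg _ _ _ _ hmin hK0, if_neg (by tauto)]
  · have hT : 0 ≤ T := by by_contra h; exact hg (Or.inl (by omega))
    have hK : 0 ≤ K := by by_contra h; exact hg (Or.inr (Or.inl (by omega)))
    have hm : 0 ≤ m := by by_contra h; exact hg (Or.inr (Or.inr (by omega)))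
    rw [if_neg hg]
    by_cases hgt : K * m < T
    · rw [if_pos hgt]
      have hfn : K.toNat = K.toNat := rfl
      exact pvAAux_gt K.toNat T K m hm hK hfn hgt
    · rw [if_neg hgt]
      rw [pvRow_eq m hm T.toNat K.toNat]
      have hlt : T.toNat < T.toNat + 1 := by omega
      rw [PySem.List.getD_map_range _ _ _ _ hlt]
      have h1 : ((T.toNat : Nat) : Int) = T := by omega
      have h2 : ((K.toNat : Nat) : Int) = K := by omega
      rw [h1, h2]
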